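-- pv_equiv track=rewrite | github.com/xxrom/696_count_binary_substrings | main.py | isZerosEqualOnes
-- ===== SOURCE A (Python) =====
-- def isZerosEqualOnes(s):
--   zerosCounter = 0
--   onesCounter = 0
--
--   for char in s:
--     if char == '0':
--       zerosCounter += 1
--     else:
--       onesCounter += 1
--
--   return zerosCounter == onesCounter
-- ===== SOURCE B (Python) =====
-- def isZerosEqualOnes(s):
--   # Divide and conquer: signed balance (+1 per '0', -1 per anything else)
--   # of s[lo:hi], computed by splitting the interval in half.
--   def balance(lo, hi):
--     if hi - lo == 0:
--       return 0
--     if hi - lo == 1: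
--       return 1 if s[lo] == '0' else -1
--     mid = (lo + hi) // 2
--     return balance(lo, mid) + balance(mid, hi)
--   return balance(0, len(s)) == 0
-- ===== Notes on version B (the rewrite author's own statement) =====
-- stated objective: alternative
-- what changed: Replaces A's linear two-counter loop by a divide-and-conquer recursion that splits the index interval in half and combines a single signed balance (+1 for '0', -1 for any other character), returning whether the total balance is zero.
import Mathlib
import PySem

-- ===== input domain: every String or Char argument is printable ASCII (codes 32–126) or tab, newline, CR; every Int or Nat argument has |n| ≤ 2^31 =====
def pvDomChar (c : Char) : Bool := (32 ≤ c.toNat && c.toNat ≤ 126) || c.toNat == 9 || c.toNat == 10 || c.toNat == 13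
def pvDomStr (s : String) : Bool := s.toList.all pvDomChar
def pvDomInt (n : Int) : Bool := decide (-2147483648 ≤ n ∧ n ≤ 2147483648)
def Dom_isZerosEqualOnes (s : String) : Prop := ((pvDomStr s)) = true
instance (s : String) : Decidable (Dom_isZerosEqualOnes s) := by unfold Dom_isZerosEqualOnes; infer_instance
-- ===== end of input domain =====

-- B replaces A's linear two-counter loop by a divide-and-conquer recursion on the
-- index interval combining one signed balance (+1 per '0', -1 otherwise); objective: alternative.

-- ===== PORT A =====
-- loop: for char in s: if char == '0': zeros += 1 else: ones += 1; return zeros == ones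
def isZerosEqualOnes (s : String) : Bool :=
  let p := s.toList.foldl
    (fun (acc : Int × Int) char =>
      if char == '0' then (acc.1 + 1, acc.2) else (acc.1, acc.2 + 1))
    (0, 0)
  p.1 == p.2

-- ===== PORT B =====
-- inner helper balance(lo, hi) of Source B; lo, hi are list indices with 0 ≤ lo ≤ hi ≤ len(s),
-- so Nat indices and Nat division mirror Python's ints and '//' exactly here, and the
-- s[lo] access (only reached with lo < hi ≤ len(s)) is always in range, so the
-- '.getD' default of pyGet? is never used.
def pyBalance (l : List Char) (lo hi : Nat) : Int :=
  if hi - lo = 0 then 0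
  else if hi - lo = 1 then
    (if (PySem.List.pyGet? l (lo : Int)).getD ' ' == '0' then 1 else -1)
  else
    pyBalance l lo ((lo + hi) / 2) + pyBalance l ((lo + hi) / 2) hi
termination_by hi - lo
decreasing_by all_goals omega

-- return balance(0, len(s)) == 0
def isZerosEqualOnes_alt (s : String) : Bool :=
  pyBalance s.toList 0 s.toList.length == 0

-- ===== PRECONDITION & SPEC =====
def Spec_isZerosEqualOnes (s : String) (out : Bool) : Prop := out = isZerosEqualOnes_alt s
instance (s : String) (out : Bool) : Decidable (Spec_isZerosEqualOnes s out) := by unfold Spec_isZerosEqualOnes; infer_instance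

-- ===== CLAIM (what is proved, stated in full; the proofs are below) =====
def Claim_equal_isZerosEqualOnes : Prop := ∀ (s : String), Dom_isZerosEqualOnes s → Spec_isZerosEqualOnes s (isZerosEqualOnes s)

-- ===== LEMMAS AND PROOFS =====

-- A's fold keeps (zeros, ones); characterize both components.
theorem foldA_eq (l : List Char) (z o : Int) :
    l.foldl (fun (acc : Int × Int) char =>
        if char == '0' then (acc.1 + 1, acc.2) else (acc.1, acc.2 + 1)) (z, o)
      = (z + l.count '0', o + (l.length - l.count '0')) := by
  induction l generalizing z o with
  | nil => simp
  | cons a t ih =>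
    by_cases h : a = '0'
    · subst h
      simp only [List.foldl_cons, beq_self_eq_true, if_true, ih, List.count_cons,
        List.length_cons, Prod.mk.injEq]
      have hle : t.count '0' ≤ t.length := List.count_le_length
      constructor <;> · push_cast; omega
    · have hb : (a == '0') = false := by simp [h]
      simp only [List.foldl_cons, hb, Bool.false_eq_true, if_false, ih,
        List.count_cons, List.length_cons, Prod.mk.injEq]
      have hle : t.count '0' ≤ t.length := List.count_le_length
      constructor <;> · push_cast; omega

-- the balance of the segment [lo, hi) is 2·(zeros in it) − its length
theorem pyBalance_eq (l : List Char) (lo hi : Nat) (hle : lo ≤ hi) (hhi : hi ≤ l.length) :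
    pyBalance l lo hi
      = 2 * (((l.drop lo).take (hi - lo)).count '0' : Int) - ((hi - lo : Nat) : Int) := by
  unfold pyBalance
  split
  · next h0 =>
    simp [h0]
  · split
    · next h0 h1 =>
      have hlt : lo < l.length := by omega
      have hdrop : l.drop lo = l[lo] :: l.drop (lo + 1) := List.drop_eq_getElem_cons hlt
      have hget : PySem.List.pyGet? l (lo : Int) = some l[lo] := by
        exact PySem.List.pyGet?_ofNat (h := hlt)
      have hcount : ((l.drop lo).take 1).count '0' = if l[lo] = '0' then 1 else 0 := by
        rw [hdrop, List.take_succ_cons, List.take_zero]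
        by_cases hc : l[lo] = '0' <;> simp [hc]
      rw [hget, h1, hcount]
      by_cases hc : l[lo] = '0' <;> simp [hc]
    · next h0 h1 =>
      have ih1 := pyBalance_eq l lo ((lo + hi) / 2) (by omega) (by omega)
      have ih2 := pyBalance_eq l ((lo + hi) / 2) hi (by omega) (by omega)
      rw [ih1, ih2]
      have hsplit : (l.drop lo).take (hi - lo)
          = (l.drop lo).take ((lo + hi) / 2 - lo)
            ++ (l.drop ((lo + hi) / 2)).take (hi - (lo + hi) / 2) := by
        have h2 : l.drop ((lo + hi) / 2) = (l.drop lo).drop ((lo + hi) / 2 - lo) := by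
          rw [List.drop_drop]; congr 1; omega
        rw [h2, ← List.take_add]
        congr 1; omega
      rw [hsplit, List.count_append]
      push_cast
      ring_nf
      omega
termination_by hi - lo
decreasing_by all_goals omega

-- ===== VERDICT (by name: the statement is the Claim_ definition above) =====
theorem isZerosEqualOnes_spec : Claim_equal_isZerosEqualOnes := by
  intro s _
  unfold Spec_isZerosEqualOnes isZerosEqualOnes isZerosEqualOnes_alt
  rw [foldA_eq, pyBalance_eq s.toList 0 s.toList.length (Nat.zero_le _) le_rfl]
  have hle : s.toList.count '0' ≤ s.toList.length := List.count_le_length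
  simp only [zero_add, List.drop_zero, Nat.sub_zero, List.take_length]
  rw [Bool.eq_iff_iff]
  simp only [beq_iff_eq]
  omega
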